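-- pv_equiv track=rewrite | github.com/matheusfrancisco/playground.programming | MIT.6006/solutions/6006-code/substring2.py | k_substring
-- ===== SOURCE A (Python) =====
-- def k_substring(s, t, k):
--     """Finds a substring of length k in both s and t if there is one,
--     and returns it. Otherwise, returns None."""
--     s_substrings = set()
--     # Put all substrings of s of length k into a set: s_substrings
--     for s_start in range(len(s)-k+1):
--         current = s[s_start : s_start+k]
--         s_substrings.add(current)
--     # For every substring of t of length k, look for it in
--     # s_substrings. If it's there, return it.
--     for t_start in range(len(t)-k+1):
--         current = t[t_start : t_start+k]
--         if current in s_substrings: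
--             return current
--     return None
-- ===== SOURCE B (Python) =====
-- def k_substring(s, t, k):
--     """Finds a substring of length k in both s and t if there is one,
--     and returns it. Otherwise, returns None.
--
--     Different strategy than scanning t against a set of s-windows:
--     index each distinct window of t by its FIRST start position, then
--     scan s's windows once, keeping the smallest t-start seen; the
--     answer is t's window at that smallest start."""
--     first = {}
--     for j in range(len(t) - k + 1):
--         w = t[j : j + k]
--         if w not in first:
--             first[w] = j
--     best = None
--     for i in range(len(s) - k + 1):
--         j = first.get(s[i : i + k])
--         if j is not None and (best is None or j < best):
--             best = j
--     return None if best is None else t[best : best + k]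
-- ===== Notes on version B (the rewrite author's own statement) =====
-- stated objective: alternative
-- what changed: Instead of collecting s's windows into a set and scanning t with an early return, B builds a dict mapping each distinct window of t to its first start index, then scans s once accumulating the minimum such index and returns t's window there.
import Mathlib
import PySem

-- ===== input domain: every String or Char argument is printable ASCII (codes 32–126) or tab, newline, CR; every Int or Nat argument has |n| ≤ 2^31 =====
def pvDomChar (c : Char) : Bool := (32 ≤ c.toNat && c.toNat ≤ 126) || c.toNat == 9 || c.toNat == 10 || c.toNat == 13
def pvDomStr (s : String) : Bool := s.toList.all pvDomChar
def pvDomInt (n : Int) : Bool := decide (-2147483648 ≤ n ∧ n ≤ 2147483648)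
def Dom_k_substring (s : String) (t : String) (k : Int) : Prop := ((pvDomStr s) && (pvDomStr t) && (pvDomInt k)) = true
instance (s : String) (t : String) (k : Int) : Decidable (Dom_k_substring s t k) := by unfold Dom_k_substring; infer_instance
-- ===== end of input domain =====

-- B replaces A's set-of-s-windows + early-return scan of t by a first-index dict of t's windows
-- and a single minimum-accumulating scan of s (alternative decomposition, same cost).

-- ===== PORT A =====
-- A's second for-loop ('for t_start in range(...): ... return current') with its early return
def kSubLoopA (t : String) (k : Int) (ss : PySem.Set String) : List Int → Option String
  | [] => none
  | j :: rest =>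
    let current := PySem.Str.slice t (some j) (some (j + k))
    if PySem.Set.contains ss current then some current else kSubLoopA t k ss rest

def k_substring (s : String) (t : String) (k : Int) : Option String :=
  let s_substrings :=
    (PySem.List.pyRange 0 (PySem.Str.len s - k + 1) 1).foldl
      (fun acc i => PySem.Set.add acc (PySem.Str.slice s (some i) (some (i + k))))
      PySem.Set.empty
  kSubLoopA t k s_substrings (PySem.List.pyRange 0 (PySem.Str.len t - k + 1) 1)

-- ===== PORT B =====
def k_substring_alt (s : String) (t : String) (k : Int) : Option String :=
  let first :=
    (PySem.List.pyRange 0 (PySem.Str.len t - k + 1) 1).foldl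
      (fun d j =>
        let w := PySem.Str.slice t (some j) (some (j + k))
        if d.contains w then d else d.insert w j)
      (PySem.Dict.empty : PySem.Dict String Int)
  let best :=
    (PySem.List.pyRange 0 (PySem.Str.len s - k + 1) 1).foldl
      (fun best i =>
        match first.get? (PySem.Str.slice s (some i) (some (i + k))) with
        | none => best
        | some j =>
          match best with
          | none => some j
          | some b => if j < b then some j else best)
      (none : Option Int)
  match best with
  | none => none
  | some b => some (PySem.Str.slice t (some b) (some (b + k)))

-- ===== PRECONDITION & SPEC =====
def Spec_k_substring (s : String) (t : String) (k : Int) (out : Option String) : Prop := out = k_substring_alt s t k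
instance (s : String) (t : String) (k : Int) (out : Option String) : Decidable (Spec_k_substring s t k out) := by unfold Spec_k_substring; infer_instance

-- ===== CLAIM (what is proved, stated in full; the proofs are below) =====
def Claim_equal_k_substring : Prop := ∀ (s : String) (t : String) (k : Int), Dom_k_substring s t k → Spec_k_substring s t k (k_substring s t k)

-- ===== LEMMAS AND PROOFS =====

-- the length-k window of u starting at j (proof-side abbreviation)
def pvWin (u : String) (k j : Int) : String := PySem.Str.slice u (some j) (some (j + k))

-- A's t-loop is a find?-then-map
theorem pvLoopA_eq (t : String) (k : Int) (ss : PySem.Set String) (l : List Int) :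
    kSubLoopA t k ss l
      = (l.find? (fun j => PySem.Set.contains ss (pvWin t k j))).map (pvWin t k) := by
  induction l with
  | nil => rfl
  | cons j rest ih =>
    simp only [kSubLoopA, List.find?, pvWin]
    cases h : PySem.Set.contains ss (PySem.Str.slice t (some j) (some (j + k))) with
    | true => rfl
    | false => simp only [Bool.false_eq_true, if_false]; rw [ih]; rfl

-- B's dict loop: first.get? w is the first j in the range whose window equals w
theorem pvDictFold_get? (f : Int → String) (l : List Int) (d : PySem.Dict String Int) (w : String) :
    ((l.foldl (fun d j => if d.contains (f j) then d else d.insert (f j) j) d).get? w)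
      = match d.get? w with
        | some v => some v
        | none => l.find? (fun j => f j == w) := by
  induction l generalizing d with
  | nil => cases h : d.get? w <;> simp [h]
  | cons j rest ih =>
    simp only [List.foldl_cons, List.find?]
    by_cases hj : f j = w
    · subst hj
      cases hd : d.get? (f j) with
      | some v =>
        have hc : d.contains (f j) = true := by
          rw [PySem.Dict.contains_eq_isSome_get?, hd]; rfl
        rw [hc, if_pos rfl, ih, hd]
      | none =>
        have hc : d.contains (f j) = false := by
          rw [PySem.Dict.contains_eq_isSome_get?, hd]; rfl
        rw [hc, if_neg (by simp), ih, PySem.Dict.get?_insert_self]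
        simp
    · have hne : w ≠ f j := fun h => hj h.symm
      have hbeq : (f j == w) = false := by simp; exact hj
      cases hc : d.contains (f j) with
      | true =>
        rw [if_pos rfl, ih]
        cases hd : d.get? w <;> simp [hbeq]
      | false =>
        rw [if_neg (by simp), ih, PySem.Dict.get?_insert_of_ne d j hne]
        cases hd : d.get? w <;> simp [hbeq]

-- B's running minimum, isolated
def pvMin2 (b : Option Int) (j : Int) : Option Int :=
  match b with
  | none => some j
  | some b' => if j < b' then some j else some b'

theorem pvBestFold_eq (h : Int → Option Int) (l : List Int) (b : Option Int) :
    (l.foldl (fun best i =>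
        match h i with
        | none => best
        | some j =>
          match best with
          | none => some j
          | some b => if j < b then some j else best) b)
      = (l.filterMap h).foldl pvMin2 b := by
  induction l generalizing b with
  | nil => rfl
  | cons a rest ih =>
    simp only [List.foldl_cons, List.filterMap_cons]
    cases ha : h a with
    | none => simp [ih]
    | some j => cases b <;> simp [ih, pvMin2]

theorem pvFoldl_min2_some (l : List Int) (b : Int) :
    l.foldl pvMin2 (some b) = some (l.foldl min b) := by
  induction l generalizing b with
  | nil => rfl
  | cons a rest ih =>
    simp only [List.foldl_cons]
    have h : pvMin2 (some b) a = some (min b a) := by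
      simp only [pvMin2]
      rw [min_def]
      split_ifs <;> simp <;> omega
    rw [h, ih]

theorem pvFoldl_min2_none (l : List Int) : l.foldl pvMin2 none = l.min? := by
  cases l with
  | nil => rfl
  | cons a rest =>
    simp only [List.foldl_cons]
    show List.foldl pvMin2 (some a) rest = _
    rw [pvFoldl_min2_some]
    rfl

-- on a strictly increasing list, find? returns the least satisfying element
theorem pvFind?_min {p : Int → Bool} {a : Int} :
    ∀ {l : List Int}, l.Pairwise (· < ·) → l.find? p = some a →
      ∀ b ∈ l, p b = true → a ≤ b := by
  intro l
  induction l with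
  | nil => intro _ h; simp at h
  | cons x rest ih =>
    intro hp hf b hb hpb
    rcases List.pairwise_cons.mp hp with ⟨hx, hrest⟩
    simp only [List.find?] at hf
    cases hpx : p x with
    | true =>
      rw [hpx] at hf
      simp only [Option.some.injEq] at hf
      subst hf
      rcases List.mem_cons.mp hb with h | h
      · omega
      · exact le_of_lt (hx b h)
    | false =>
      rw [hpx] at hf
      rcases List.mem_cons.mp hb with h | h
      · subst h; rw [hpx] at hpb; exact absurd hpb (by simp)
      · exact ih hrest hf b h hpb


-- the heart of the equivalence, over abstract window maps f (for s) and g (for t):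
-- scanning Lt for the first window in {f i} equals taking the minimum first-index over Ls
theorem pvMain (f g : Int → String) (Ls Lt : List Int) (hLt : Lt.Pairwise (· < ·)) :
    ((Lt.find? (fun j => PySem.Set.contains (PySem.Set.ofList (Ls.map f)) (g j))).map g)
      = (match (Ls.filterMap (fun i => Lt.find? (fun j => g j == f i))).min? with
         | none => none
         | some b => some (g b)) := by
  cases hfind : Lt.find? (fun j => PySem.Set.contains (PySem.Set.ofList (Ls.map f)) (g j)) with
  | none =>
    have hnone := List.find?_eq_none.mp hfind
    have hvals : Ls.filterMap (fun i => Lt.find? (fun j => g j == f i)) = [] := by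
      rw [List.filterMap_eq_nil_iff]
      intro i hi
      cases hfi : Lt.find? (fun j => g j == f i) with
      | none => rfl
      | some v =>
        exfalso
        have hgv : g v = f i := by simpa using List.find?_some hfi
        apply hnone v (List.mem_of_find?_eq_some hfi)
        rw [PySem.Set.contains_iff, PySem.Set.mem_ofList, hgv]
        exact List.mem_map_of_mem hi
    rw [hvals]
    rfl
  | some j0 =>
    have hpj : PySem.Set.contains (PySem.Set.ofList (Ls.map f)) (g j0) = true := by
      have := List.find?_some hfind
      simpa using this
    have hj0mem := List.mem_of_find?_eq_some hfind
    have hmin : ∀ b ∈ Lt,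
        PySem.Set.contains (PySem.Set.ofList (Ls.map f)) (g b) = true → j0 ≤ b :=
      pvFind?_min hLt hfind
    obtain ⟨i0, hi0, hfi0⟩ : ∃ i ∈ Ls, f i = g j0 := by
      rw [PySem.Set.contains_iff, PySem.Set.mem_ofList, List.mem_map] at hpj
      exact hpj
    have hhi0 : Lt.find? (fun j => g j == f i0) = some j0 := by
      cases hfi : Lt.find? (fun j => g j == f i0) with
      | none =>
        exfalso
        exact List.find?_eq_none.mp hfi j0 hj0mem (by simp [hfi0])
      | some v =>
        have hgv : g v = f i0 := by simpa using List.find?_some hfi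
        have h1 : j0 ≤ v := by
          apply hmin v (List.mem_of_find?_eq_some hfi)
          rw [hgv, hfi0]
          exact hpj
        have h2 : v ≤ j0 := pvFind?_min hLt hfi j0 hj0mem (by simp [hfi0])
        rw [le_antisymm h2 h1]
    have hj0vals : j0 ∈ Ls.filterMap (fun i => Lt.find? (fun j => g j == f i)) :=
      List.mem_filterMap.mpr ⟨i0, hi0, hhi0⟩
    have hlb : ∀ v ∈ Ls.filterMap (fun i => Lt.find? (fun j => g j == f i)), j0 ≤ v := by
      intro v hv
      obtain ⟨i, hi, hfi⟩ := List.mem_filterMap.mp hv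
      have hgv : g v = f i := by simpa using List.find?_some hfi
      apply hmin v (List.mem_of_find?_eq_some hfi)
      rw [PySem.Set.contains_iff, PySem.Set.mem_ofList, hgv]
      exact List.mem_map_of_mem hi
    rw [List.min?_eq_some_iff.mpr ⟨hj0vals, hlb⟩]
    rfl

theorem k_substring_eq_alt (s t : String) (k : Int) :
    k_substring s t k = k_substring_alt s t k := by
  have hset : (PySem.List.pyRange 0 (PySem.Str.len s - k + 1) 1).foldl
      (fun acc i => PySem.Set.add acc (PySem.Str.slice s (some i) (some (i + k))))
      PySem.Set.empty
    = PySem.Set.ofList ((PySem.List.pyRange 0 (PySem.Str.len s - k + 1) 1).map (pvWin s k)) := by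
    rw [PySem.Set.ofList_eq_foldl, List.foldl_map]
    rfl
  have hA : k_substring s t k
      = ((PySem.List.pyRange 0 (PySem.Str.len t - k + 1) 1).find?
          (fun j => PySem.Set.contains
            (PySem.Set.ofList ((PySem.List.pyRange 0 (PySem.Str.len s - k + 1) 1).map (pvWin s k)))
            (pvWin t k j))).map (pvWin t k) := by
    show kSubLoopA t k
        ((PySem.List.pyRange 0 (PySem.Str.len s - k + 1) 1).foldl
          (fun acc i => PySem.Set.add acc (PySem.Str.slice s (some i) (some (i + k))))
          PySem.Set.empty)
        (PySem.List.pyRange 0 (PySem.Str.len t - k + 1) 1) = _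
    rw [hset, pvLoopA_eq]
  have hdict : ∀ w, ((PySem.List.pyRange 0 (PySem.Str.len t - k + 1) 1).foldl
      (fun d j => if d.contains (pvWin t k j) then d else d.insert (pvWin t k j) j)
      (PySem.Dict.empty : PySem.Dict String Int)).get? w
    = (PySem.List.pyRange 0 (PySem.Str.len t - k + 1) 1).find? (fun j => pvWin t k j == w) := by
    intro w
    rw [pvDictFold_get? (pvWin t k)]
    rw [PySem.Dict.get?_empty]
  have hB : k_substring_alt s t k =
      (match ((PySem.List.pyRange 0 (PySem.Str.len s - k + 1) 1).filterMap
          (fun i => (PySem.List.pyRange 0 (PySem.Str.len t - k + 1) 1).find?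
            (fun j => pvWin t k j == pvWin s k i))).min? with
       | none => none
       | some b => some (pvWin t k b)) := by
    show (match ((PySem.List.pyRange 0 (PySem.Str.len s - k + 1) 1).foldl
        (fun best i =>
          match ((PySem.List.pyRange 0 (PySem.Str.len t - k + 1) 1).foldl
              (fun d j => if d.contains (pvWin t k j) then d else d.insert (pvWin t k j) j)
              (PySem.Dict.empty : PySem.Dict String Int)).get? (pvWin s k i) with
          | none => best
          | some j =>
            match best with
            | none => some j
            | some b => if j < b then some j else best)
        (none : Option Int)) with
      | none => none
      | some b => some (pvWin t k b)) = _
    have hstep : (fun (best : Option Int) (i : Int) =>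
        match ((PySem.List.pyRange 0 (PySem.Str.len t - k + 1) 1).foldl
            (fun d j => if d.contains (pvWin t k j) then d else d.insert (pvWin t k j) j)
            (PySem.Dict.empty : PySem.Dict String Int)).get? (pvWin s k i) with
        | none => best
        | some j =>
          match best with
          | none => some j
          | some b => if j < b then some j else best)
      = (fun (best : Option Int) (i : Int) =>
          match (PySem.List.pyRange 0 (PySem.Str.len t - k + 1) 1).find?
              (fun j => pvWin t k j == pvWin s k i) with
          | none => best
          | some j =>
            match best with
            | none => some j
            | some b => if j < b then some j else best) := by
      funext best i
      rw [hdict]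
    rw [hstep, pvBestFold_eq, pvFoldl_min2_none]
  rw [hA, hB]
  exact pvMain (pvWin s k) (pvWin t k)
    (PySem.List.pyRange 0 (PySem.Str.len s - k + 1) 1)
    (PySem.List.pyRange 0 (PySem.Str.len t - k + 1) 1)
    (PySem.List.pairwise_lt_pyRange_one 0 (PySem.Str.len t - k + 1))


-- ===== VERDICT (by name: the statement is the Claim_ definition above) =====
theorem k_substring_spec : Claim_equal_k_substring := by
  intro s t k _
  unfold Spec_k_substring
  exact k_substring_eq_alt s t k
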